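-- pv_equiv track=rewrite | github.com/yucheng-zeng/NLP-Code | 命名实体提取/CRF地点识别.py | tag_line
-- ===== SOURCE A (Python) =====
-- def tag_line(words):
--     chars = []  # 用于记录地名
--     tags = []  # 用于几率标签
--     temp_word = ''  # 用于合并组合词
--     for word in words:
--         word = word.strip('\t ')  # 去除前后空行
--         w, h = word.split('/')  # 分割组合为 词 标签
--         if len(w) == 0:
--             continue
--         if temp_word == '':
--             bracket_start = word.find('[')  # 找到 [ 的下表, 若果没有找打则返回-1
--             if bracket_start == -1:  # 未找到括号[，说明不是组合词
--                 chars.extend(w)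
--                 if h == 'ns':  # 如果这个非组合词是地名的话, 则记录下来, 标记为BME形式或者S
--                     tags += ['S'] if len(w) == 1 else ['B'] + ['M'] * (len(w)-2) + ['E']
--                 else:
--                     tags += ['O'] * len(w)  # 否则标记为外部词汇
--             else:  # 找到了左括号[，进入组合词
--                 w = w[bracket_start+1:]  # 获取该组合词
--                 temp_word += w  # 记录组合词内容
--         else:
--             bracket_end = word.find(']')
--             if bracket_end == -1:  # 未找到右括号，仍在组合词中
--                 temp_word += w  # 记录组合词内容
--             else:
--                 w = temp_word + w
--                 h = word[bracket_end+1:]  # 组合词结束之后会有标注, 获取组合词的标注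
--                 chars.extend(w)
--                 if h == 'ns':  # 查看组合词时候是地名, 则记录下来, 标记为BME形式或者S
--                     tags += ['S'] if len(w) == 1 else ['B'] + ['M'] * (len(w)-2) + ['E']
--                 else:
--                     tags += ['O'] * len(w)  # 否则标记为外部词汇
--                 temp_word = ''  # 重置组合词
--
--     assert temp_word == ''  # 检测异常错误, 组合词没到 ] 就停止了
--     return chars, tags
-- ===== SOURCE B (Python) =====
-- def _seg_tags(n, is_ns):
--     if not is_ns:
--         return ['O'] * n
--     return ['S'] if n == 1 else ['B'] + ['M'] * (n - 2) + ['E']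
--
--
-- def tag_line(words):
--     # Index-driven scan: a bracket group is consumed wholesale by a nested inner
--     # loop (no cross-iteration mode flag), producing (text, is_ns) segments.
--     segments = []
--     i = 0
--     n = len(words)
--     while i < n:
--         word = words[i].strip('\t ')
--         w, h = word.split('/')
--         i += 1
--         if not w:
--             continue
--         k = word.find('[')
--         if k == -1:
--             segments.append((w, h == 'ns'))
--             continue
--         buf = w[k + 1:]
--         if not buf:
--             continue
--         closed = False
--         while i < n:
--             word = words[i].strip('\t ')
--             w, h = word.split('/')
--             i += 1
--             if not w:
--                 continue
--             j = word.find(']')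
--             if j == -1:
--                 buf += w
--             else:
--                 segments.append((buf + w, word[j + 1:] == 'ns'))
--                 closed = True
--                 break
--         assert closed
--     chars = [c for text, _ in segments for c in text]
--     tags = [t for text, ns in segments for t in _seg_tags(len(text), ns)]
--     return chars, tags
-- ===== Notes on version B (the rewrite author's own statement) =====
-- stated objective: alternative
-- what changed: A is one flat loop whose bracket state is a mode flag (the buffer's emptiness) threaded across iterations; B scans by explicit index and consumes each bracket group wholesale with a nested inner loop, collecting (text, is_ns) segments that are then rendered into chars/tags by flat comprehensions.
import Mathlib
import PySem

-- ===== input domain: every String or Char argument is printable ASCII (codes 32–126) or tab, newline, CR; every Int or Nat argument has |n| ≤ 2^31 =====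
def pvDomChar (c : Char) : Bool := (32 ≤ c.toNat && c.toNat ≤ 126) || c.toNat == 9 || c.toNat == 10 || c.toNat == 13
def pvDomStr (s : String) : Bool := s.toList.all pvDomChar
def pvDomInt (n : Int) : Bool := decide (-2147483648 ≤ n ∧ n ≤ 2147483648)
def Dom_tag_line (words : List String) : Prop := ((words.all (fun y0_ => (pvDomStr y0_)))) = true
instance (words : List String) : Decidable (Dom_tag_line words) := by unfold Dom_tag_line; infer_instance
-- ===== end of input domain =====

-- B replaces A's flat mode-flag loop by an index scan with a nested inner loop that consumes a
-- whole bracket group at once into segments, rendered afterwards (objective: alternative).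


-- ===== PORT A =====
-- one loop iteration of A; state = (chars, tags, temp_word)
def tagLineStepA (st : List String × List String × List Char) (word0 : String) :
    List String × List String × List Char :=
  let word := PySem.Chars.stripChars word0.toList ['\t', ' ']
  match PySem.Chars.splitOn word ['/'] with
  | [w, h] =>
    let (chars, tags, temp) := st
    if w.length = 0 then st          -- continue
    else if temp = [] then
      let bracket_start := PySem.Chars.find word ['[']
      if bracket_start = -1 then
        (chars ++ w.map (fun c => String.ofList [c]),
         tags ++ (if h = ['n', 's'] then
                    (if w.length = 1 then ["S"]
                     else ["B"] ++ List.replicate (w.length - 2) "M" ++ ["E"])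
                  else List.replicate w.length "O"),
         temp)
      else
        (chars, tags, temp ++ PySem.List.slice w (some (bracket_start + 1)) none)
    else
      let bracket_end := PySem.Chars.find word [']']
      if bracket_end = -1 then
        (chars, tags, temp ++ w)
      else
        let w' := temp ++ w
        let h' := PySem.List.slice word (some (bracket_end + 1)) none
        (chars ++ w'.map (fun c => String.ofList [c]),
         tags ++ (if h' = ['n', 's'] then
                    (if w'.length = 1 then ["S"]
                     else ["B"] ++ List.replicate (w'.length - 2) "M" ++ ["E"])
                  else List.replicate w'.length "O"),
         [])
  | _ => st                           -- 'w, h = word.split(...)' raises ValueError: excluded by Pre_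

def tag_line (words : List String) : List String × List String :=
  let st := words.foldl tagLineStepA ([], [], [])
  (st.1, st.2.1)                      -- the final assert raising is excluded by Pre_

-- ===== PORT B =====
-- tags for one segment of length n ( _seg_tags in Source B )
def segTags (n : Nat) (isNs : Bool) : List String :=
  if isNs then (if n = 1 then ["S"] else ["B"] ++ List.replicate (n - 2) "M" ++ ["E"])
  else List.replicate n "O"

-- B's inner loop: consume the rest of one bracket group; returns the finished
-- segment (none = the group never closed, Python's assert fires: excluded by Pre_)
-- and the words left after the group.
def consumeGroup (buf : List Char) : List String → Option (List Char × Bool) × List String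
  | [] => (none, [])
  | word0 :: rest =>
    let word := PySem.Chars.stripChars word0.toList ['\t', ' ']
    match PySem.Chars.splitOn word ['/'] with
    | [w, _h] =>
      if w.length = 0 then consumeGroup buf rest
      else
        let j := PySem.Chars.find word [']']
        if j = -1 then consumeGroup (buf ++ w) rest
        else (some (buf ++ w, PySem.List.slice word (some (j + 1)) none == ['n', 's']), rest)
    | _ => consumeGroup buf rest      -- ValueError: excluded by Pre_

theorem consumeGroup_rest_le (buf : List Char) (ws : List String) :
    (consumeGroup buf ws).2.length ≤ ws.length := by
  induction ws generalizing buf with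
  | nil => simp [consumeGroup]
  | cons w0 rest ih =>
    unfold consumeGroup
    cases h : PySem.Chars.splitOn (PySem.Chars.stripChars w0.toList ['\t', ' ']) ['/'] with
    | nil => simp only [h]; exact Nat.le_succ_of_le (ih buf)
    | cons a t =>
      cases t with
      | nil => simp only [h]; exact Nat.le_succ_of_le (ih buf)
      | cons b t2 =>
        cases t2 with
        | cons c t3 => simp only [h]; exact Nat.le_succ_of_le (ih buf)
        | nil =>
          simp only [h]
          split_ifs with h1 h2
          · exact Nat.le_succ_of_le (ih buf)
          · exact Nat.le_succ_of_le (ih (buf ++ a))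
          · simp

-- B's outer loop: parse the word list into (text, is_ns) segments.
def parseSegs : List String → List (List Char × Bool)
  | [] => []
  | word0 :: rest =>
    let word := PySem.Chars.stripChars word0.toList ['\t', ' ']
    match PySem.Chars.splitOn word ['/'] with
    | [w, h] =>
      if w.length = 0 then parseSegs rest
      else
        let k := PySem.Chars.find word ['[']
        if k = -1 then (w, h == ['n', 's']) :: parseSegs rest
        else
          let buf := PySem.List.slice w (some (k + 1)) none
          if buf = [] then parseSegs rest
          else
            let r := consumeGroup buf rest
            (match r.1 with | some s => [s] | none => []) ++ parseSegs r.2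
    | _ => parseSegs rest             -- ValueError: excluded by Pre_
termination_by ws => ws.length
decreasing_by
  all_goals simp
  all_goals try omega
  all_goals (have := consumeGroup_rest_le (PySem.List.slice w (some (PySem.Chars.find (PySem.Chars.stripChars word0.toList ['\t', ' ']) ['['] + 1)) none) rest; simp at this; omega)

def tag_line_alt (words : List String) : List String × List String :=
  let segs := parseSegs words
  (segs.flatMap (fun s => s.1.map (fun c => String.ofList [c])),
   segs.flatMap (fun s => segTags s.1.length s.2))

-- ===== PRECONDITION & SPEC =====
-- Python A raises ValueError when a stripped word does not contain exactly one '/', and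
-- AssertionError (the final assert) when the bracketed combining buffer is still nonempty at the
-- end; Pre_ excludes exactly those inputs. tagLineBufEmpty only tracks the buffer's EMPTINESS
-- (bracket structure of the input), it computes no part of either output.
def tagLineBufEmpty (words : List String) : Bool :=
  words.foldl (fun (empty : Bool) word0 =>
    let word := PySem.Chars.stripChars word0.toList ['\t', ' ']
    let w := word.takeWhile (· ≠ '/')
    if w.length = 0 then empty
    else if empty then
      (if PySem.Chars.find word ['['] = -1 then true
       else PySem.List.slice w (some (PySem.Chars.find word ['['] + 1)) none = [])
    else PySem.Chars.find word [']'] ≠ -1) true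

def Pre_tag_line (words : List String) : Prop :=
  words.all (fun w => PySem.Chars.count (PySem.Chars.stripChars w.toList ['\t', ' ']) ['/'] == 1) = true
  ∧ tagLineBufEmpty words = true

instance (words : List String) : Decidable (Pre_tag_line words) := by
  unfold Pre_tag_line; infer_instance

def pvWitness_tag_line : List String := ["[ab/ns", "cd/n]ns", " x/m ", "q/ns"]

def Spec_tag_line (words : List String) (out : List String × List String) : Prop := out = tag_line_alt words
instance (words : List String) (out : List String × List String) : Decidable (Spec_tag_line words out) := by unfold Spec_tag_line; infer_instance

-- ===== CLAIM (what is proved, stated in full; the proofs are below) =====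
def Claim_equal_tag_line : Prop := ∀ (words : List String), Dom_tag_line words → Pre_tag_line words → Spec_tag_line words (tag_line words)

-- ===== LEMMAS AND PROOFS =====

def segChars (segs : List (List Char × Bool)) : List String :=
  segs.flatMap (fun s => s.1.map (fun c => String.ofList [c]))
def segTagsAll (segs : List (List Char × Bool)) : List String :=
  segs.flatMap (fun s => segTags s.1.length s.2)

theorem parseSegs_nil : parseSegs [] = [] := by rw [parseSegs]

-- running A's loop from a nonempty buffer mirrors consumeGroup
theorem tagLine_consume (ws : List String) :
    ∀ (buf : List Char) (chars tags : List String), buf ≠ [] →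
      (match consumeGroup buf ws with
       | (some s, rest) =>
           List.foldl tagLineStepA (chars, tags, buf) ws
             = List.foldl tagLineStepA
                 (chars ++ s.1.map (fun c => String.ofList [c]),
                  tags ++ segTags s.1.length s.2, ([] : List Char)) rest
       | (none, _rest) =>
           ∃ buf', buf' ≠ [] ∧
             List.foldl tagLineStepA (chars, tags, buf) ws = (chars, tags, buf')) := by
  induction ws with
  | nil => intro buf chars tags hb; exact ⟨buf, hb, rfl⟩
  | cons word0 rest ih =>
    intro buf chars tags hb
    simp only [consumeGroup, List.foldl_cons]
    cases h : PySem.Chars.splitOn (PySem.Chars.stripChars word0.toList ['\t', ' ']) ['/'] with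
    | nil => simpa [tagLineStepA, h] using ih buf chars tags hb
    | cons a t =>
      cases t with
      | nil => simpa [tagLineStepA, h] using ih buf chars tags hb
      | cons b t2 =>
        cases t2 with
        | cons c t3 => simpa [tagLineStepA, h] using ih buf chars tags hb
        | nil =>
          by_cases hw : a = []
          · simpa [tagLineStepA, h, hw] using ih buf chars tags hb
          · by_cases hf : PySem.Chars.find (PySem.Chars.stripChars word0.toList ['\t', ' ']) [']'] = -1
            · have hstep : tagLineStepA (chars, tags, buf) word0 = (chars, tags, buf ++ a) := by
                simp [tagLineStepA, h, hw, hb, hf, List.length_eq_zero_iff]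
              have hne : buf ++ a ≠ [] := by simp [hb]
              simpa [hstep, hw, hf, List.length_eq_zero_iff] using ih (buf ++ a) chars tags hne
            · have hstep : tagLineStepA (chars, tags, buf) word0
                  = (chars ++ (buf ++ a).map (fun c => String.ofList [c]),
                     tags ++ segTags (buf ++ a).length
                       (PySem.List.slice (PySem.Chars.stripChars word0.toList ['\t', ' '])
                         (some (PySem.Chars.find (PySem.Chars.stripChars word0.toList ['\t', ' ']) [']'] + 1)) none == ['n', 's']),
                     ([] : List Char)) := by
                simp only [tagLineStepA, h, segTags]
                simp [hw, hb, hf, List.length_eq_zero_iff, beq_iff_eq]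
              simp only [hw, hf, List.length_eq_zero_iff]
              simp [hstep]

theorem consumeGroup_none_nil (buf : List Char) (ws rest' : List String)
    (h : consumeGroup buf ws = (none, rest')) : rest' = [] := by
  induction ws generalizing buf with
  | nil => simpa [consumeGroup, Prod.ext_iff] using h
  | cons w0 rest ih =>
    revert h
    unfold consumeGroup
    cases hs : PySem.Chars.splitOn (PySem.Chars.stripChars w0.toList ['\t', ' ']) ['/'] with
    | nil => simp only [hs]; exact fun h => ih buf h
    | cons a t =>
      cases t with
      | nil => simp only [hs]; exact fun h => ih buf h
      | cons b t2 =>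
        cases t2 with
        | cons c t3 => simp only [hs]; exact fun h => ih buf h
        | nil =>
          simp only [hs]
          split_ifs with h1 h2
          · exact fun h => ih buf h
          · exact fun h => ih (buf ++ a) h
          · intro h; simp [Prod.ext_iff] at h

-- main invariant: A's loop from an empty buffer appends exactly B's rendered segments
theorem tagLine_main (n : Nat) :
    ∀ (ws : List String), ws.length ≤ n → ∀ (chars tags : List String),
      ((List.foldl tagLineStepA (chars, tags, ([] : List Char)) ws).1,
       (List.foldl tagLineStepA (chars, tags, ([] : List Char)) ws).2.1)
        = (chars ++ segChars (parseSegs ws), tags ++ segTagsAll (parseSegs ws)) := by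
  induction n with
  | zero =>
    intro ws hlen chars tags
    have : ws = [] := List.eq_nil_of_length_eq_zero (Nat.le_zero.mp hlen)
    subst this; rw [parseSegs]; simp [segChars, segTagsAll]
  | succ n ih =>
    intro ws hlen chars tags
    cases ws with
    | nil => rw [parseSegs]; simp [segChars, segTagsAll]
    | cons word0 rest =>
      have hrest : rest.length ≤ n := by simpa using Nat.succ_le_succ_iff.mp hlen
      simp only [List.foldl_cons]
      unfold parseSegs
      cases h : PySem.Chars.splitOn (PySem.Chars.stripChars word0.toList ['\t', ' ']) ['/'] with
      | nil => simpa [tagLineStepA, h] using ih rest hrest chars tags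
      | cons a t =>
        cases t with
        | nil => simpa [tagLineStepA, h] using ih rest hrest chars tags
        | cons b t2 =>
          cases t2 with
          | cons c t3 => simpa [tagLineStepA, h] using ih rest hrest chars tags
          | nil =>
            by_cases hw : a = []
            · simpa [tagLineStepA, h, hw] using ih rest hrest chars tags
            · by_cases hk : PySem.Chars.find (PySem.Chars.stripChars word0.toList ['\t', ' ']) ['['] = -1
              · have hstep : tagLineStepA (chars, tags, ([] : List Char)) word0
                    = (chars ++ a.map (fun c => String.ofList [c]),
                       tags ++ segTags a.length (b == ['n', 's']), ([] : List Char)) := by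
                  simp only [tagLineStepA, h, segTags]
                  simp [hw, hk, List.length_eq_zero_iff, beq_iff_eq]
                rw [hstep, ih rest hrest]
                simp [h, hw, hk, List.length_eq_zero_iff, segChars, segTagsAll]
              · set word := PySem.Chars.stripChars word0.toList ['\t', ' '] with hword
                set buf := PySem.List.slice a (some (PySem.Chars.find word ['['] + 1)) none with hbuf
                have hstep : tagLineStepA (chars, tags, ([] : List Char)) word0
                    = (chars, tags, buf) := by
                  simp [tagLineStepA, ← hword, h, hw, hk, List.length_eq_zero_iff, ← hbuf]
                rw [hstep]
                by_cases hbe : buf = []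
                · rw [hbe]
                  simpa [← hword, h, hw, hk, ← hbuf, hbe, List.length_eq_zero_iff] using ih rest hrest chars tags
                · have hcons := tagLine_consume rest buf chars tags hbe
                  cases hc : consumeGroup buf rest with
                  | mk segq rest' =>
                    cases segq with
                    | some s =>
                      rw [hc] at hcons
                      simp only at hcons
                      rw [hcons]
                      have hr' : rest'.length ≤ n := by
                        have := consumeGroup_rest_le buf rest
                        rw [hc] at this; simp at this; omega
                      rw [ih rest' hr']
                      simp [← hword, h, hw, hk, ← hbuf, hbe, hc, List.length_eq_zero_iff, segChars, segTagsAll]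
                    | none =>
                      rw [hc] at hcons
                      obtain ⟨buf', _, heq⟩ := hcons
                      rw [heq]
                      simp [h, hw, hk, ← hbuf, hbe, hc, List.length_eq_zero_iff, segChars, segTagsAll,
                        consumeGroup_none_nil buf rest rest' hc, parseSegs_nil]

-- ===== VERDICT (by name: the statement is the Claim_ definition above) =====
theorem tag_line_spec : Claim_equal_tag_line := by
  intro words _ _
  unfold Spec_tag_line tag_line tag_line_alt
  have h := tagLine_main words.length words le_rfl [] []
  simp only [List.nil_append] at h
  exact Prod.ext (congrArg Prod.fst h) (congrArg Prod.snd h)
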